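-- pv_equiv track=rewrite | github.com/z-station/cappa | src/app/translators/checkers/str_checker.py | checker
-- ===== SOURCE A (Python) =====
-- def checker(right_value: str, value: str) -> bool:
--
--     """ Сравнение двух строковых значений построчно
--
--        :param right_value: str - эталонное значение для сравнения
--        :param value: str - сравниваемое с эталоном значение
--
--     Сценарии сравнения:
--     - проверить, если right_value это несколько значений,
--       каждое с новой строки, то сравнивать построчно.
--     - если right_value или value - некорректное значение
--       то результат False """
--
--     empty_values = ('', None)
--
--     if value in empty_values or right_value in empty_values:
--         return right_value == value
--     else:
--         result = True
--         new_line = '\n'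
--         if new_line not in right_value:
--             result = right_value == value
--         else:
--             right_value_list = right_value.split(new_line)
--             value_list = value.split(new_line)
--             if len(right_value_list) != len(value_list):
--                 result = False
--             else:
--                 for e, v in zip(right_value_list, value_list):
--                     if e != v:
--                         result = False
--                         break
--     return result
-- ===== SOURCE B (Python) =====
-- def checker(right_value: str, value: str) -> bool:
--     # Splitting both strings on '\n' and comparing line by line (with the
--     # length check and the empty/no-newline special cases) is exactly whole-string
--     # equality, so B is the direct comparison.
--     return value == right_value
-- ===== Notes on version B (the rewrite author's own statement) =====
-- stated objective: simpler
-- what changed: The empty-value guard, the no-newline branch and the split-on-newline zip loop with a length check all collapse to plain string equality, so B is a single whole-string equality expression with no branching or iteration.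
import Mathlib
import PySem

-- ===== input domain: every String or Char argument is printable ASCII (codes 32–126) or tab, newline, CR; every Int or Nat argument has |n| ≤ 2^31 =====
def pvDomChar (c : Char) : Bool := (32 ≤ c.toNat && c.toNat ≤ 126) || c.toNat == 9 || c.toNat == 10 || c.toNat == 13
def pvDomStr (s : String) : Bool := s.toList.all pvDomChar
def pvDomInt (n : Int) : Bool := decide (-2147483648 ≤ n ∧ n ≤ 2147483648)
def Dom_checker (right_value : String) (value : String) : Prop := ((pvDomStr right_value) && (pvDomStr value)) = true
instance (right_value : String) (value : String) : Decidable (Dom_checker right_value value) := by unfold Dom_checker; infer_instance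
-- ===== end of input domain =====

-- B replaces A's split-on-newline, length-check and zip loop by the single
-- whole-string equality test; equivalence is proved, nothing more is claimed.

-- ===== PORT A =====
-- the 'for e, v in zip(...): if e != v: result = False; break' loop
def checkerLoop : List (String × String) → Bool
  | [] => true
  | (e, v) :: rest => if e ≠ v then false else checkerLoop rest

def checker (right_value : String) (value : String) : Bool :=
  -- 'value in ('', None) or right_value in ('', None)': both arguments are str, so only '' can match
  if value = "" ∨ right_value = "" then right_value == value
  else if PySem.Str.isIn "\n" right_value = false then right_value == value
  else
    -- right_value.split('\n') — sep is the nonempty literal '\n', so Python's split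
    -- is exactly PySem.Chars.splitOn mapped back to String (cf. PySem.Str.split?)
    let right_value_list := (PySem.Chars.splitOn right_value.toList ['\n']).map String.ofList
    let value_list := (PySem.Chars.splitOn value.toList ['\n']).map String.ofList
    if right_value_list.length ≠ value_list.length then false
    else checkerLoop (right_value_list.zip value_list)

-- ===== PORT B =====
def checker_alt (right_value : String) (value : String) : Bool :=
  value == right_value

-- ===== PRECONDITION & SPEC =====
def Spec_checker (right_value : String) (value : String) (out : Bool) : Prop := out = checker_alt right_value value
instance (right_value : String) (value : String) (out : Bool) : Decidable (Spec_checker right_value value out) := by unfold Spec_checker; infer_instance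

-- ===== CLAIM (what is proved, stated in full; the proofs are below) =====
def Claim_equal_checker : Prop := ∀ (right_value : String) (value : String), Dom_checker right_value value → Spec_checker right_value value (checker right_value value)

-- ===== LEMMAS AND PROOFS =====

-- intercalate over a cons with a nonempty tail
theorem intercalate_cons_ne_nil (sep a : List Char) (l : List (List Char)) (h : l ≠ []) :
    sep.intercalate (a :: l) = a ++ sep ++ sep.intercalate l := by
  cases l with
  | nil => simp_all
  | cons b t => simp [List.intercalate, List.intersperse, List.flatten]

theorem splitOn_go_ne_nil (sep : List Char) (fuel : Nat) (l cur : List Char)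
    (acc : List (List Char)) : PySem.Chars.splitOn.go sep fuel l cur acc ≠ [] := by
  induction fuel generalizing l cur acc with
  | zero => simp [PySem.Chars.splitOn.go]
  | succ n ih =>
    cases l with
    | nil => simp [PySem.Chars.splitOn.go]
    | cons c rest =>
      simp only [PySem.Chars.splitOn.go]
      split_ifs with h
      · exact ih _ _ _
      · exact ih _ _ _

-- splitOn.go only ever appends to its accumulator
theorem splitOn_go_acc (sep : List Char) (fuel : Nat) (l cur : List Char)
    (acc : List (List Char)) :
    PySem.Chars.splitOn.go sep fuel l cur acc
      = acc.reverse ++ PySem.Chars.splitOn.go sep fuel l cur [] := by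
  induction fuel generalizing l cur acc with
  | zero => simp [PySem.Chars.splitOn.go]
  | succ n ih =>
    cases l with
    | nil => simp [PySem.Chars.splitOn.go]
    | cons c rest =>
      simp only [PySem.Chars.splitOn.go]
      split_ifs with h
      · rw [ih _ _ (cur.reverse :: acc), ih _ _ [cur.reverse]]
        simp
      · exact ih _ _ _

-- joining the pieces with the separator recovers the input
theorem intercalate_splitOn_go (sep : List Char) (hsep : sep ≠ [])
    (fuel : Nat) (l cur : List Char) (hf : l.length ≤ fuel) :
    sep.intercalate (PySem.Chars.splitOn.go sep fuel l cur [])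
      = cur.reverse ++ l := by
  induction fuel generalizing l cur with
  | zero =>
    have : l = [] := by cases l <;> simp_all
    subst this
    simp [PySem.Chars.splitOn.go, List.intercalate]
  | succ n ih =>
    cases l with
    | nil => simp [PySem.Chars.splitOn.go, List.intercalate]
    | cons c rest =>
      simp only [PySem.Chars.splitOn.go]
      split_ifs with h
      · obtain ⟨t, ht⟩ := List.isPrefixOf_iff_prefix.mp h
        have hslen : 1 ≤ sep.length := by cases sep <;> simp_all
        have hdlen : (List.drop sep.length (c :: rest)).length ≤ n := by
          simp only [List.length_drop, List.length_cons] at *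
          omega
        rw [splitOn_go_acc sep n _ [] [cur.reverse]]
        simp only [List.reverse_cons, List.reverse_nil, List.nil_append,
          List.singleton_append]
        rw [intercalate_cons_ne_nil _ _ _ (splitOn_go_ne_nil sep n _ [] [])]
        rw [ih _ [] hdlen]
        have hdrop : List.drop sep.length (c :: rest) = t := by
          rw [← ht, List.drop_left]
        rw [hdrop]
        simp [← ht]
      · have hlen : rest.length ≤ n := by simp at hf; omega
        simpa using ih rest (c :: cur) hlen

theorem intercalate_splitOn (sep : List Char) (hsep : sep ≠ []) (s : List Char) :
    sep.intercalate (PySem.Chars.splitOn s sep) = s := by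
  have := intercalate_splitOn_go sep hsep (s.length + 1) s [] (by omega)
  simpa [PySem.Chars.splitOn] using this

theorem splitOn_inj {sep s t : List Char} (hsep : sep ≠ [])
    (h : PySem.Chars.splitOn s sep = PySem.Chars.splitOn t sep) : s = t := by
  have hs := intercalate_splitOn sep hsep s
  have ht := intercalate_splitOn sep hsep t
  rw [← hs, ← ht, h]

theorem checkerLoop_self (l : List String) : checkerLoop (l.zip l) = true := by
  induction l with
  | nil => rfl
  | cons a t ih => simpa [checkerLoop] using ih

theorem checkerLoop_eq_true (xs : List String) : ∀ ys, xs.length = ys.length →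
    checkerLoop (xs.zip ys) = true → xs = ys := by
  induction xs with
  | nil => intro ys hlen _; cases ys <;> simp_all
  | cons a t ih =>
    intro ys hlen h
    cases ys with
    | nil => simp_all
    | cons b u =>
      by_cases hab : a = b
      · subst hab
        have h' : checkerLoop (t.zip u) = true := by
          simpa [checkerLoop] using h
        rw [ih u (by simpa using hlen) h']
      · simp [checkerLoop, hab] at h

-- ===== VERDICT (by name: the statement is the Claim_ definition above) =====
theorem checker_spec : Claim_equal_checker := by
  intro rv v _
  unfold Spec_checker checker checker_alt
  split_ifs with h1 h2
  · simp [eq_comm]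
  · simp [eq_comm]
  · dsimp only
    by_cases hev : rv = v
    · subst hev
      simp [checkerLoop_self]
    · have hne : (PySem.Chars.splitOn rv.toList ['\n']).map String.ofList
          ≠ (PySem.Chars.splitOn v.toList ['\n']).map String.ofList := by
        intro hmap
        apply hev
        have : PySem.Chars.splitOn rv.toList ['\n'] = PySem.Chars.splitOn v.toList ['\n'] := by
          have hinj : Function.Injective String.ofList := by
            intro a b hab
            have := congrArg String.toList hab
            simpa using this
          exact List.map_injective_iff.mpr hinj hmap
        have := splitOn_inj (by simp) this
        exact String.toList_inj.mp this
      split_ifs with hlen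
      · simp [Ne.symm hev]
      · push Not at hlen
        rw [show (v == rv) = false by simp [Ne.symm hev]]
        cases hloop : checkerLoop
          (((PySem.Chars.splitOn rv.toList ['\n']).map String.ofList).zip
            ((PySem.Chars.splitOn v.toList ['\n']).map String.ofList)) with
        | false => rfl
        | true => exact absurd (checkerLoop_eq_true _ _ hlen hloop) hne
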